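-- pv_equiv track=rewrite | github.com/leo-gan/performance_hotspots | ph/alert_api.py | remove_fields
-- ===== SOURCE A (Python) =====
-- def remove_fields(alert, removed_fields):
--     """
--     Removes removed_fields from the 'record' element of the alert.
--     Args:
--         alert: a dictionary
--         removed_fields: a list of the field names
--
--     Returns:
--         alert: with removed fields.
--
--     """
--     if not alert or 'record' not in alert or not alert['record'] or not removed_fields:
--         return alert
--     rec_field = alert['record']
--     for removed_field in removed_fields:
--         if removed_field in rec_field:
--             del rec_field[removed_field]
--     return alert
-- ===== SOURCE B (Python) =====
-- def remove_fields(alert, removed_fields):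
--     rec_field = alert.get('record') if alert else None
--     if not rec_field or not removed_fields:
--         return alert
--     removed = set(removed_fields)
--     kept = [(k, v) for k, v in rec_field.items() if k not in removed]
--     rec_field.clear()
--     rec_field.update(kept)
--     return alert
-- ===== Notes on version B (the rewrite author's own statement) =====
-- stated objective: alternative
-- what changed: B filters the record's items into a kept list in one comprehension against a set of removed names and then rewrites the record via clear()+update(kept), instead of probing the record and deleting it per removed field.
import Mathlib
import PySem

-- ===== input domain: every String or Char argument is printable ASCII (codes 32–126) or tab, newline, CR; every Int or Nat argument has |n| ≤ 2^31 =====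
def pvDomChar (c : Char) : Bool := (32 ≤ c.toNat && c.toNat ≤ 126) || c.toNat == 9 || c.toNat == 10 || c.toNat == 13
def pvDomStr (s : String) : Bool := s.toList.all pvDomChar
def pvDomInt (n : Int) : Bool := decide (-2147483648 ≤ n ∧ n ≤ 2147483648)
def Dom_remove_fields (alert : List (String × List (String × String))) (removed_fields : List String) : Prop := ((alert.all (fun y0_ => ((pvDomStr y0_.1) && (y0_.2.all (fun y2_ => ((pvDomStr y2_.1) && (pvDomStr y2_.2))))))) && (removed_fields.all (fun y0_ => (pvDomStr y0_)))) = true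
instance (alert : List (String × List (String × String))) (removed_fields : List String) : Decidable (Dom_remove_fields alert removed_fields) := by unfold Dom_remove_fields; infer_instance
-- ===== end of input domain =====

-- B filters the record's items once against a set of removed names and rewrites the record,
-- instead of probing the record per removed field; equivalence is about the RETURN value
-- (Python A and B both mutate alert['record'] in place in the same way).

-- ===== PORT A =====
-- A: guard (empty alert / no 'record' / empty record / empty removed_fields), then for each
-- removed_field, if it is a key of the record, delete it; return alert with the mutated
-- record written back.
def remove_fields (alert : List (String × List (String × String))) (removed_fields : List String) : List (String × List (String × String)) :=
  if alert.isEmpty then alert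
  else
    match alert.find? (fun p => p.1 == "record") with
    | none => alert
    | some (_, rec0) =>
      if rec0.isEmpty || removed_fields.isEmpty then alert
      else
        let rec1 := removed_fields.foldl
          (fun r f => if r.any (fun p => p.1 == f) then r.filter (fun p => !(p.1 == f)) else r) rec0
        alert.map (fun p => if p.1 == "record" then (p.1, rec1) else p)

-- ===== PORT B =====
-- B-side helper: the comprehension [(k, v) for k, v in rec if k not in removed].
def keptPairs (removed : PySem.Set String) : List (String × String) → List (String × String)
  | [] => []
  | p :: rest =>
    if removed.contains p.1 then keptPairs removed rest
    else p :: keptPairs removed rest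

-- B-side helper: rec_field.clear(); rec_field.update(kept) — the record object now holds
-- exactly the kept pairs; in the alert this rewrites the value stored under 'record'.
def putRecord (rec1 : List (String × String)) : List (String × List (String × String)) → List (String × List (String × String))
  | [] => []
  | p :: rest =>
    if p.1 == "record" then ("record", rec1) :: putRecord rec1 rest
    else p :: putRecord rec1 rest

-- B: fetch the record (None if the alert is empty or has no 'record'); bail out on a falsy
-- record or empty removed_fields; otherwise build the kept pairs and rewrite the record.
def remove_fields_alt (alert : List (String × List (String × String))) (removed_fields : List String) : List (String × List (String × String)) :=
  match alert.find? (fun p => p.1 == "record") with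
  | none => alert
  | some (_, rec0) =>
    match rec0, removed_fields with
    | [], _ => alert
    | _, [] => alert
    | _ :: _, _ :: _ =>
      putRecord (keptPairs (PySem.Set.ofList removed_fields) rec0) alert

-- ===== PRECONDITION & SPEC =====
def Spec_remove_fields (alert : List (String × List (String × String))) (removed_fields : List String) (out : List (String × List (String × String))) : Prop := out = remove_fields_alt alert removed_fields
instance (alert : List (String × List (String × String))) (removed_fields : List String) (out : List (String × List (String × String))) : Decidable (Spec_remove_fields alert removed_fields out) := by unfold Spec_remove_fields; infer_instance

-- ===== CLAIM (what is proved, stated in full; the proofs are below) =====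
def Claim_equal_remove_fields : Prop := ∀ (alert : List (String × List (String × String))) (removed_fields : List String), Dom_remove_fields alert removed_fields → Spec_remove_fields alert removed_fields (remove_fields alert removed_fields)

-- ===== LEMMAS AND PROOFS =====

-- One membership-guarded deletion step of A's loop is a plain filter.
theorem step_eq_filter (r : List (String × String)) (f : String) :
    (if r.any (fun p => p.1 == f) then r.filter (fun p => !(p.1 == f)) else r)
      = r.filter (fun p => !(p.1 == f)) := by
  split_ifs with h
  · rfl
  · symm
    apply List.filter_eq_self.mpr
    intro p hp
    simp only [List.any_eq_true, not_exists, not_and] at h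
    simp [h p hp]

-- A's loop over removed_fields filters out every key occurring in removed_fields.
theorem loopA_eq_filter (rfs : List String) (r : List (String × String)) :
    rfs.foldl (fun r f => if r.any (fun p => p.1 == f) then r.filter (fun p => !(p.1 == f)) else r) r
      = r.filter (fun p => !(rfs.contains p.1)) := by
  induction rfs generalizing r with
  | nil => simp
  | cons f rest ih =>
    rw [List.foldl_cons, step_eq_filter, ih, List.filter_filter]
    apply List.filter_congr
    intro p _
    by_cases h : p.1 = f <;> simp [h]

-- B's comprehension is the same filter.
theorem keptPairs_eq_filter (rfs : List String) (r : List (String × String)) :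
    keptPairs (PySem.Set.ofList rfs) r = r.filter (fun p => !(rfs.contains p.1)) := by
  induction r with
  | nil => rfl
  | cons p rest ih =>
    rw [keptPairs, ih]
    have hc : (PySem.Set.ofList rfs).contains p.1 = rfs.contains p.1 := by
      simp [PySem.Set.mem_ofList]
    rw [List.filter_cons, hc]
    cases rfs.contains p.1 <;> simp

-- B's record rewrite is A's map over the alert.
theorem putRecord_eq_map (rec1 : List (String × String)) (xs : List (String × List (String × String))) :
    putRecord rec1 xs = xs.map (fun p => if p.1 == "record" then (p.1, rec1) else p) := by
  induction xs with
  | nil => rfl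
  | cons p rest ih =>
    rw [putRecord, List.map_cons, ih]
    by_cases h : p.1 = "record" <;> simp [h]

-- ===== VERDICT (by name: the statement is the Claim_ definition above) =====
theorem remove_fields_spec : Claim_equal_remove_fields := by
  intro alert rfs _
  show remove_fields alert rfs = remove_fields_alt alert rfs
  unfold remove_fields remove_fields_alt
  by_cases ha : alert.isEmpty
  · have : alert = [] := List.isEmpty_iff.mp ha
    subst this
    simp
  simp only [ha, Bool.false_eq_true, if_neg, not_false_eq_true]
  cases hfind : alert.find? (fun p => p.1 == "record") with
  | none => rfl
  | some pr =>
    obtain ⟨k0, rec0⟩ := pr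
    cases rec0 with
    | nil => simp
    | cons q qs =>
      cases rfs with
      | nil => simp
      | cons f fs =>
        simp only [List.isEmpty_cons, Bool.or_self, Bool.false_eq_true, if_neg, not_false_eq_true]
        rw [loopA_eq_filter, putRecord_eq_map, keptPairs_eq_filter]
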